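-- pv_equiv track=rewrite | github.com/MrR3353/wro2018 | logic/algo.py | straight_routes
-- ===== SOURCE A (Python) =====
-- def straight_routes(route):
--     '''
--     Builds a list of straight routes from route
--     :param route:
--     :return: list of list of coords
--     '''
--
--     if len(route) == 1:
--         return [route]
--
--     def get_axis(coord1, coord2):
--         '''
--         On which axis occurs change of position
--         :param coord1:
--         :param coord2:
--         :return:
--         '''
--         if coord1[0] == coord2[0]:
--             return 'x'
--         else:
--             return 'y'
--
--     res = []
--
--     prev_axis = get_axis(route[0], route[1])
--     prev_ind = 0
--     for i in range(2, len(route)):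
--         cur_axis = get_axis(route[i - 1], route[i])
--         if cur_axis != prev_axis:
--             res.append(route[prev_ind:i])
--             prev_axis = cur_axis
--             prev_ind = i
--     res.append(route[prev_ind:len(route)])
--     return res
-- ===== SOURCE B (Python) =====
-- def straight_routes(route):
--     '''
--     Builds a list of straight routes from route
--     :param route:
--     :return: list of list of coords
--     '''
--     def is_corner(j):
--         # point j is a corner iff the step into it and the step out of it
--         # change position on different axes (stateless test on the triple)
--         return (route[j - 1][0] == route[j][0]) != (route[j][0] == route[j + 1][0])
--
--     n = len(route)
--     segments = []
--     cur = []
--     # walk the route backwards, collecting points of the current straight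
--     # segment; a corner closes the segment built so far (the corner itself
--     # belongs to the earlier, i.e. next-to-be-built, segment)
--     for j in range(n - 1, -1, -1):
--         if 1 <= j <= n - 2 and is_corner(j):
--             cur.reverse()
--             segments.append(cur)
--             cur = []
--         cur.append(route[j])
--     cur.reverse()
--     segments.append(cur)
--     segments.reverse()
--     return segments
-- ===== Notes on version B (the rewrite author's own statement) =====
-- stated objective: alternative
-- what changed: Replaced A's forward index loop with running prev_axis/prev_ind state and index slicing by a backward traversal that uses a stateless corner test on each triple of points (no axis labels, no running state, no len==1 special case) and assembles the segments element-by-element back-to-front.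
-- outside the precondition, e.g. on straight_routes([]): A raises IndexError, B returns [[]]
import Mathlib
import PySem

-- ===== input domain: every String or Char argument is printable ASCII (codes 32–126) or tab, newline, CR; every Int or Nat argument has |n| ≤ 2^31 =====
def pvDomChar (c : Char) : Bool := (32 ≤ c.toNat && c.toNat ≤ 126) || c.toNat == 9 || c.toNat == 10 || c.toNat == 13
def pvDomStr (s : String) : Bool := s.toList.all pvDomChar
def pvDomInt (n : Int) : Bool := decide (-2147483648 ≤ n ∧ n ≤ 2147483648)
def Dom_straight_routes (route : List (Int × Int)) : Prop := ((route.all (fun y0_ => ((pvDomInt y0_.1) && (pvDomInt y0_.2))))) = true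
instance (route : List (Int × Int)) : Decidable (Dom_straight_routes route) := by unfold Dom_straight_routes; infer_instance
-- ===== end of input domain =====

-- B walks the route backwards with a stateless corner test on each triple of points and
-- assembles the segments element-by-element back-to-front (no axis labels, no running
-- prev_axis/prev_ind state, no slicing); objective: alternative decomposition, same cost.

-- ===== PORT A =====
-- route[i] (Pre_ excludes the empty route, the only input where A's indexing raises)
def srGet (route : List (Int × Int)) (i : Int) : Int × Int :=
  PySem.List.pyGetD route i (0, 0)

-- A's inner helper get_axis
def srGetAxis (c1 c2 : Int × Int) : String :=
  if c1.1 = c2.1 then "x" else "y"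

-- the body of A's for-loop, acting on the state (res, prev_axis, prev_ind)
def srStep (route : List (Int × Int))
    (st : List (List (Int × Int)) × String × Int) (i : Int) :
    List (List (Int × Int)) × String × Int :=
  let curAxis := srGetAxis (srGet route (i - 1)) (srGet route i)
  if curAxis ≠ st.2.1 then
    (st.1 ++ [PySem.List.slice route (some st.2.2) (some i)], curAxis, i)
  else st

def straight_routes (route : List (Int × Int)) : List (List (Int × Int)) :=
  if route.length = 1 then [route]
  else
    let st := (PySem.List.pyRange 2 (route.length : Int) 1).foldl (srStep route)
      ([], srGetAxis (srGet route 0) (srGet route 1), 0)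
    st.1 ++ [PySem.List.slice route (some st.2.2) (some (route.length : Int))]

-- ===== PORT B =====
-- B's inner helper is_corner (only called with 1 ≤ j ≤ n-2, so pyGetD is exact)
def srCorner (route : List (Int × Int)) (j : Int) : Bool :=
  ((PySem.List.pyGetD route (j - 1) (0, 0)).1 == (PySem.List.pyGetD route j (0, 0)).1)
    != ((PySem.List.pyGetD route j (0, 0)).1 == (PySem.List.pyGetD route (j + 1) (0, 0)).1)

-- the body of B's backward for-loop, acting on the state (segments, cur)
def srStepB (route : List (Int × Int)) (n : Int)
    (st : List (List (Int × Int)) × List (Int × Int)) (j : Int) :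
    List (List (Int × Int)) × List (Int × Int) :=
  let st' := if 1 ≤ j ∧ j ≤ n - 2 ∧ srCorner route j then
      (st.1 ++ [st.2.reverse], ([] : List (Int × Int)))
    else st
  (st'.1, st'.2 ++ [PySem.List.pyGetD route j (0, 0)])

def straight_routes_alt (route : List (Int × Int)) : List (List (Int × Int)) :=
  let n : Int := route.length
  let st := (PySem.List.pyRange (n - 1) (-1) (-1)).foldl (srStepB route n) ([], [])
  (st.1 ++ [st.2.reverse]).reverse

-- ===== PRECONDITION & SPEC =====
-- A raises IndexError exactly on the empty route (route[0] in get_axis); nothing else is excluded.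
def Pre_straight_routes (route : List (Int × Int)) : Prop := route ≠ []
instance (route : List (Int × Int)) : Decidable (Pre_straight_routes route) := by
  unfold Pre_straight_routes; infer_instance

def pvWitness_straight_routes : (List (Int × Int)) := [(0, 0), (0, 1), (1, 1)]

def Spec_straight_routes (route : List (Int × Int)) (out : List (List (Int × Int))) : Prop := out = straight_routes_alt route
instance (route : List (Int × Int)) (out : List (List (Int × Int))) : Decidable (Spec_straight_routes route out) := by unfold Spec_straight_routes; infer_instance

-- ===== CLAIM (what is proved, stated in full; the proofs are below) =====
def Claim_equal_straight_routes : Prop := ∀ (route : List (Int × Int)), Dom_straight_routes route → Pre_straight_routes route → Spec_straight_routes route (straight_routes route)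

-- ===== LEMMAS AND PROOFS =====

-- the axis label of the pair (route[i], route[i+1])
def srAxisAt (route : List (Int × Int)) (i : Int) : String :=
  if (PySem.List.pyGetD route i (0, 0)).1 = (PySem.List.pyGetD route (i + 1) (0, 0)).1
  then "x" else "y"

-- slices of route between consecutive members of a cut list
def pairSlices (route : List (Int × Int)) : List Int → List (List (Int × Int))
  | a :: b :: rest =>
      PySem.List.slice route (some a) (some b) :: pairSlices route (b :: rest)
  | _ => []

-- the interior cut positions: i+1 for each label change at i, i in [lo, hi)
def srChg (route : List (Int × Int)) (lo hi : Int) : List Int :=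
  ((PySem.List.pyRange lo hi 1).filter
    (fun i => srAxisAt route i ≠ srAxisAt route (i - 1))).map (· + 1)

def lastD (l : List Int) (d : Int) : Int := l.getLast?.getD d

@[simp] lemma pairSlices_single (route : List (Int × Int)) (a : Int) :
    pairSlices route [a] = [] := rfl

@[simp] lemma pairSlices_cons_cons (route : List (Int × Int)) (a b : Int) (l : List Int) :
    pairSlices route (a :: b :: l)
      = PySem.List.slice route (some a) (some b) :: pairSlices route (b :: l) := rfl

@[simp] lemma lastD_single (a d : Int) : lastD [a] d = a := rfl

lemma lastD_cons_cons (a b : Int) (l : List Int) (d : Int) :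
    lastD (a :: b :: l) d = lastD (b :: l) d := by
  simp [lastD, List.getLast?_cons_cons]

lemma srGetAxis_eq_axisAt (route : List (Int × Int)) (i : Int) :
    srGetAxis (srGet route (i - 1)) (srGet route i) = srAxisAt route (i - 1) := by
  simp [srGetAxis, srGet, srAxisAt]

lemma srChg_nil (route : List (Int × Int)) {lo hi : Int} (h : hi ≤ lo) :
    srChg route lo hi = [] := by
  simp [srChg, PySem.List.pyRange_one_eq_nil h]

-- A's loop, characterised: folding srStep over range(a, b) from the invariant state
lemma srFold (route : List (Int × Int)) (b : Int) :
    ∀ (k : Nat) (a : Int), a + k = b → 2 ≤ a →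
    ∀ (res : List (List (Int × Int))) (p : Int),
    (PySem.List.pyRange a b 1).foldl (srStep route) (res, srAxisAt route (a - 2), p)
      = (res ++ pairSlices route (p :: srChg route (a - 1) (b - 1)),
         srAxisAt route (b - 2),
         lastD (p :: srChg route (a - 1) (b - 1)) 0) := by
  intro k
  induction k with
  | zero =>
      intro a hab ha res p
      have hb : a = b := by omega
      subst hb
      simp [PySem.List.pyRange_one_eq_nil (le_refl a), srChg_nil route (le_refl (a - 1))]
  | succ k ih =>
      intro a hab ha res p
      have hlt : a < b := by omega
      rw [PySem.List.pyRange_one_cons hlt]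
      have hstep : srStep route (res, srAxisAt route (a - 2), p) a
          = if srAxisAt route (a - 1) ≠ srAxisAt route (a - 2) then
              (res ++ [PySem.List.slice route (some p) (some a)], srAxisAt route (a - 1), a)
            else (res, srAxisAt route (a - 2), p) := by
        simp only [srStep, srGetAxis_eq_axisAt]
      have ha1 : a - 1 - 1 = a - 2 := by omega
      have hchg : srChg route (a - 1) (b - 1)
          = if srAxisAt route (a - 1) ≠ srAxisAt route (a - 2) then
              a :: srChg route a (b - 1)
            else srChg route a (b - 1) := by
        rw [srChg, PySem.List.pyRange_one_cons (by omega : a - 1 < b - 1),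
          show a - 1 + 1 = a from by omega, List.filter_cons]
        by_cases h : srAxisAt route (a - 1) ≠ srAxisAt route (a - 2)
        · have h' : srAxisAt route (a - 1) ≠ srAxisAt route (a - 1 - 1) := by
            rw [ha1]; exact h
          rw [if_pos h, decide_eq_true h']
          simp only [if_true, List.map_cons]
          rw [srChg]
          congr 1
          omega
        · have h' : ¬ srAxisAt route (a - 1) ≠ srAxisAt route (a - 1 - 1) := by
            rw [ha1]; exact h
          rw [if_neg h, decide_eq_false h']
          simp only [Bool.false_eq_true, if_false]
          rw [srChg]
      have hax : a + 1 - 2 = a - 1 := by omega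
      have hax2 : a + 1 - 1 = a := by omega
      by_cases h : srAxisAt route (a - 1) ≠ srAxisAt route (a - 2)
      · rw [List.foldl_cons, hstep, if_pos h]
        have hih := ih (a + 1) (by omega) (by omega)
          (res ++ [PySem.List.slice route (some p) (some a)]) a
        rw [hax, hax2] at hih
        rw [hih, hchg, if_pos h, pairSlices_cons_cons, lastD_cons_cons]
        simp
      · rw [List.foldl_cons, hstep, if_neg h]
        rw [not_ne_iff] at h
        have hih := ih (a + 1) (by omega) (by omega) res p
        rw [hax, hax2, h] at hih
        rw [hih, hchg, if_neg (by simp [h])]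

lemma pairSlices_append_last (route : List (Int × Int)) (n : Int) :
    ∀ (l : List Int), l ≠ [] →
    pairSlices route (l ++ [n])
      = pairSlices route l ++ [PySem.List.slice route (some (lastD l 0)) (some n)] := by
  intro l
  induction l with
  | nil => intro h; exact absurd rfl h
  | cons a t ih =>
      intro _
      cases t with
      | nil => simp [pairSlices, lastD]
      | cons b t' =>
          have := ih (by simp)
          simp only [List.cons_append] at this ⊢
          rw [pairSlices_cons_cons, this, pairSlices_cons_cons, lastD_cons_cons]
          simp

-- countdown range, peeled at the BOTTOM end
lemma pyRange_down_snoc (a b : Int) (h : b ≤ a) :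
    PySem.List.pyRange a (b - 1) (-1) = PySem.List.pyRange a b (-1) ++ [b] := by
  rw [PySem.List.pyRange_neg_one_eq_reverse, PySem.List.pyRange_neg_one_eq_reverse,
    show b - 1 + 1 = b from by omega, PySem.List.pyRange_one_cons (by omega : b < a + 1)]
  simp

-- B's corner test agrees with the label-change condition
lemma srCorner_iff (route : List (Int × Int)) (j : Int) :
    srCorner route j = true ↔ srAxisAt route j ≠ srAxisAt route (j - 1) := by
  simp only [srCorner, srAxisAt, show j - 1 + 1 = j from by omega, bne_iff_ne, ne_eq]
  by_cases h1 : (PySem.List.pyGetD route (j - 1) (0, 0)).1 = (PySem.List.pyGetD route j (0, 0)).1 <;>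
    by_cases h2 : (PySem.List.pyGetD route j (0, 0)).1 = (PySem.List.pyGetD route (j + 1) (0, 0)).1 <;>
      simp [h1, h2]

-- elements of srChg route lo hi lie in (lo, hi]
lemma srChg_mem (route : List (Int × Int)) (lo hi c : Int)
    (h : c ∈ srChg route lo hi) : lo < c ∧ c ≤ hi := by
  simp only [srChg, List.mem_map, List.mem_filter] at h
  obtain ⟨i, ⟨hm, _⟩, rfl⟩ := h
  rw [PySem.List.mem_pyRange_one] at hm
  omega

-- head of the cut list (default n) after peeling position j
lemma srChg_head_default (route : List (Int × Int)) (lo hi d : Int) :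
    ((srChg route lo hi).headD d) = (srChg route lo hi ++ [d]).headD 0 := by
  cases h : srChg route lo hi <;> simp [h]

-- a slice grows by one element at the bottom
lemma slice_cons_bot (route : List (Int × Int)) (j e : Int)
    (h0 : 0 ≤ j) (hje : j < e) (hlen : j < (route.length : Int)) :
    PySem.List.slice route (some j) (some e)
      = PySem.List.pyGetD route j (0, 0) :: PySem.List.slice route (some (j + 1)) (some e) := by
  rw [PySem.List.slice_toNat _ h0 (by omega), PySem.List.slice_toNat _ (by omega) (by omega)]
  have hjl : j.toNat < route.length := by omega
  have hd : route.drop j.toNat = route[j.toNat] :: route.drop (j.toNat + 1) :=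
    List.drop_eq_getElem_cons hjl
  have hget : PySem.List.pyGetD route j (0, 0) = route[j.toNat] := by
    rw [PySem.List.pyGetD_of_nonneg _ _ h0]
    simp [List.getD, List.getElem?_eq_getElem hjl]
  rw [hd, hget, show (j + 1).toNat = j.toNat + 1 from by omega]
  have : e.toNat - j.toNat = (e.toNat - (j.toNat + 1)) + 1 := by omega
  rw [this, List.take_succ_cons]

-- slicing between the head of a non-empty cut list
lemma pairSlices_cons_head (route : List (Int × Int)) (a : Int) (l : List Int) (h : l ≠ []) :
    pairSlices route (a :: l)
      = PySem.List.slice route (some a) (some (l.headD 0)) :: pairSlices route l := by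
  cases l with
  | nil => exact absurd rfl h
  | cons c t => rfl

-- the B invariant: folding srStepB over [n-1, …, j] from the empty state
lemma srFoldB (route : List (Int × Int)) (hn : 2 ≤ route.length) :
    ∀ (k : Nat) (j : Int), j + k = (route.length : Int) - 1 → 1 ≤ j →
    (PySem.List.pyRange ((route.length : Int) - 1) (j - 1) (-1)).foldl
        (srStepB route (route.length : Int)) ([], [])
      = ((pairSlices route (srChg route j ((route.length : Int) - 1) ++ [(route.length : Int)])).reverse,
         (PySem.List.slice route (some j)
            (some ((srChg route j ((route.length : Int) - 1)).headD (route.length : Int)))).reverse) := by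
  intro k
  induction k with
  | zero =>
      intro j hj h1
      have hj' : j = (route.length : Int) - 1 := by omega
      subst hj'
      rw [pyRange_down_snoc _ _ (le_refl _), PySem.List.pyRange_neg_one_eq_nil (le_refl _)]
      rw [srChg_nil route (le_refl _)]
      simp only [List.nil_append, List.foldl_cons, List.foldl_nil, List.headD_nil]
      rw [srStepB]
      rw [if_neg (by omega : ¬ (1 ≤ (route.length : Int) - 1 ∧ (route.length : Int) - 1 ≤ (route.length : Int) - 2 ∧ srCorner route ((route.length : Int) - 1) = true))]
      rw [slice_cons_bot route _ _ (by omega) (by omega) (by omega)]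
      rw [show (route.length : Int) - 1 + 1 = (route.length : Int) from by omega]
      rw [PySem.List.slice_toNat _ (by omega) (by omega)]
      simp [pairSlices]
  | succ k ih =>
      intro j hj h1
      have hjn : j ≤ (route.length : Int) - 2 := by omega
      have hsnoc := pyRange_down_snoc ((route.length : Int) - 1) j (by omega)
      rw [hsnoc, List.foldl_append, List.foldl_cons, List.foldl_nil]
      have hih := ih (j + 1) (by omega) (by omega)
      rw [show j + 1 - 1 = j from by omega] at hih
      rw [hih]
      -- abbreviations
      set Q' := srChg route (j + 1) ((route.length : Int) - 1) with hQ'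
      have hhd : j + 1 ≤ Q'.headD (route.length : Int) := by
        cases hq : Q' with
        | nil => simp; omega
        | cons c t =>
            have := srChg_mem route (j + 1) ((route.length : Int) - 1) c
              (by rw [← hQ', hq]; exact List.mem_cons_self)
            simp; omega
      have hchg : srChg route j ((route.length : Int) - 1)
          = if srAxisAt route j ≠ srAxisAt route (j - 1) then (j + 1) :: Q' else Q' := by
        rw [srChg, PySem.List.pyRange_one_cons (by omega : j < (route.length : Int) - 1),
          List.filter_cons]
        by_cases h : srAxisAt route j ≠ srAxisAt route (j - 1)
        · rw [if_pos h, decide_eq_true h]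
          simp only [if_true, List.map_cons]
          rfl
        · rw [if_neg h, decide_eq_false h]
          simp only [Bool.false_eq_true, if_false]
          rfl
      rw [srStepB]
      by_cases h : srAxisAt route j ≠ srAxisAt route (j - 1)
      · have hc : srCorner route j = true := (srCorner_iff route j).2 h
        rw [if_pos ⟨h1, hjn, hc⟩]
        rw [hchg, if_pos h]
        simp only [List.reverse_reverse, List.cons_append]
        rw [pairSlices_cons_head route (j + 1) (Q' ++ [(route.length : Int)]) (by simp)]
        rw [← srChg_head_default route (j + 1) ((route.length : Int) - 1) (route.length : Int)]
        rw [Prod.mk.injEq]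
        refine ⟨?_, ?_⟩
        · simp
          rw [← hQ']
        · simp only [List.headD_cons, List.nil_append]
          rw [slice_cons_bot route j (j + 1) (by omega) (by omega) (by omega)]
          rw [PySem.List.slice_toNat _ (by omega) (by omega)]
          simp
      · have hc : srCorner route j = false := by
          rcases Bool.eq_false_or_eq_true (srCorner route j) with ht | hf
          · exact absurd ((srCorner_iff route j).1 ht) h
          · exact hf
        rw [if_neg (by simp [hc])]
        rw [hchg, if_neg h]
        rw [Prod.mk.injEq]
        refine ⟨?_, ?_⟩
        · rfl
        · rw [slice_cons_bot route j (Q'.headD (route.length : Int)) (by omega) (by omega) (by omega)]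
          simp

-- ===== VERDICT (by name: the statement is the Claim_ definition above) =====
theorem straight_routes_spec : Claim_equal_straight_routes := by
  intro route _ hpre
  unfold Spec_straight_routes
  by_cases h1 : route.length = 1
  · obtain ⟨p, rfl⟩ := List.length_eq_one_iff.mp h1
    rw [straight_routes, if_pos (show ([p] : List (Int × Int)).length = 1 by simp), straight_routes_alt]
    rw [show ((([p] : List (Int × Int)).length : Int) - 1) = 0 from by simp]
    rw [PySem.List.pyRange_neg_one_cons (by omega : (-1 : Int) < 0)]
    rw [show (0 : Int) - 1 = -1 from rfl, PySem.List.pyRange_neg_one_eq_nil (le_refl (-1))]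
    simp [srStepB, PySem.List.pyGetD, PySem.List.pyGet?, PySem.List.pyIdx?]
  · have h2 : 2 ≤ route.length := by
      have : route.length ≠ 0 := by simpa [List.length_eq_zero_iff] using hpre
      omega
    have hinit : srGetAxis (srGet route 0) (srGet route 1) = srAxisAt route (2 - 2) := by
      have := srGetAxis_eq_axisAt route 1
      simpa using this
    set Q1 := srChg route 1 ((route.length : Int) - 1) with hQ1
    have hA : straight_routes route
        = pairSlices route ((0 :: Q1) ++ [(route.length : Int)]) := by
      rw [straight_routes, if_neg h1, hinit,
        srFold route (route.length : Int) (route.length - 2) 2 (by omega) (by omega) [] 0]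
      rw [pairSlices_append_last route (route.length : Int) (0 :: Q1) (by simp)]
      norm_num
      exact ⟨rfl, rfl⟩
    have hhd1 : 0 < Q1.headD (route.length : Int) := by
      cases hq : Q1 with
      | nil => simp; omega
      | cons c t =>
          have := srChg_mem route 1 ((route.length : Int) - 1) c
            (by rw [← hQ1, hq]; exact List.mem_cons_self)
          simp; omega
    have hB : straight_routes_alt route
        = PySem.List.slice route (some 0) (some (Q1.headD (route.length : Int)))
            :: pairSlices route (Q1 ++ [(route.length : Int)]) := by
      rw [straight_routes_alt]
      have hr := pyRange_down_snoc ((route.length : Int) - 1) 0 (by omega)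
      rw [show (0 : Int) - 1 = -1 from by norm_num] at hr
      rw [hr, List.foldl_append]
      have hf := srFoldB route h2 (route.length - 2) 1 (by omega) (le_refl 1)
      rw [show (1 : Int) - 1 = 0 from by norm_num] at hf
      rw [← hQ1] at hf
      rw [hf]
      rw [List.foldl_cons, List.foldl_nil, srStepB]
      rw [if_neg (by omega : ¬ ((1 : Int) ≤ 0 ∧ (0 : Int) ≤ (route.length : Int) - 2 ∧ srCorner route 0 = true))]
      rw [show ((PySem.List.slice route (some 1) (some (Q1.headD (route.length : Int)))).reverse
            ++ [PySem.List.pyGetD route 0 (0, 0)]).reverse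
          = PySem.List.pyGetD route 0 (0, 0)
            :: PySem.List.slice route (some 1) (some (Q1.headD (route.length : Int))) from by simp]
      have hs := slice_cons_bot route 0 (Q1.headD (route.length : Int)) (le_refl 0) hhd1 (by omega)
      rw [show (0 : Int) + 1 = 1 from by norm_num] at hs
      rw [← hs]
      simp
    rw [hA, hB, List.cons_append]
    rw [pairSlices_cons_head route 0 (Q1 ++ [(route.length : Int)]) (by simp)]
    have hh := srChg_head_default route 1 ((route.length : Int) - 1) (route.length : Int)
    rw [← hQ1] at hh
    rw [← hh]
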